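-- pv_equiv track=rewrite | github.com/Zayus13/AoC2022 | Day14/Day14.py | draw_cave
-- ===== SOURCE A (Python) =====
-- def draw_cave(instructions, xrange, maxy):
--     minx = xrange[0]
--     cave = [["." for _ in range(xrange[0], xrange[1] + 1)] for x in range(maxy + 1)]
--     for line in instructions:
--         fx = line[0][0]
--         fy = line[0][1]
--         sx = line[1][0]
--         sy = line[1][1]
--         if fx == sx:
--             starty, endy = (fy, sy) if fy < sy else (sy, fy)
--             for i in range(starty, endy + 1):
--                 cave[i][fx - minx] = "#"
--         if fy == sy:
--             startx, endx = (fx - minx, sx - minx) if fx < sx else (sx - minx, fx - minx)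
--             for i in range(startx, endx + 1):
--                 cave[fy][i] = "#"
--     return cave
-- ===== SOURCE B (Python) =====
-- def draw_cave(instructions, xrange, maxy):
--     minx, maxx = xrange
--
--     def rock(x, y):
--         return any(
--             (line[0][0] == line[1][0] and x == line[0][0]
--              and min(line[0][1], line[1][1]) <= y <= max(line[0][1], line[1][1]))
--             or
--             (line[0][1] == line[1][1] and y == line[0][1]
--              and min(line[0][0], line[1][0]) <= x <= max(line[0][0], line[1][0]))
--             for line in instructions)
--
--     return [["#" if rock(col + minx, row) else "."
--              for col in range(maxx - minx + 1)]
--             for row in range(maxy + 1)]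
-- ===== Notes on version B (the rewrite author's own statement) =====
-- stated objective: alternative
-- what changed: B never allocates-and-mutates a grid and materializes no segment ranges at all: it classifies every cell directly with a per-cell interval test ('is this cell on some vertical/horizontal segment', via min/max inequalities) inside one nested comprehension, instead of A's allocate-dots-then-write-targeted-cells loop; Pre_ excludes segments with cells outside the grid window (x in [xrange[0], xrange[1]], y in [0, maxy]), where A raises IndexError or writes through Python's negative-index wraparound onto the opposite edge while B marks nothing outside the window.
-- outside the precondition, e.g. on draw_cave([[[0, -1], [0, -1]]], (0, 0), 1): A returns [['.'], ['#']], B returns [['.'], ['.']]; on draw_cave([[[0, 0], [0, 2]]], (0, 0), 1): A raises IndexError, B returns [['#'], ['#']]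
import Mathlib
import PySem

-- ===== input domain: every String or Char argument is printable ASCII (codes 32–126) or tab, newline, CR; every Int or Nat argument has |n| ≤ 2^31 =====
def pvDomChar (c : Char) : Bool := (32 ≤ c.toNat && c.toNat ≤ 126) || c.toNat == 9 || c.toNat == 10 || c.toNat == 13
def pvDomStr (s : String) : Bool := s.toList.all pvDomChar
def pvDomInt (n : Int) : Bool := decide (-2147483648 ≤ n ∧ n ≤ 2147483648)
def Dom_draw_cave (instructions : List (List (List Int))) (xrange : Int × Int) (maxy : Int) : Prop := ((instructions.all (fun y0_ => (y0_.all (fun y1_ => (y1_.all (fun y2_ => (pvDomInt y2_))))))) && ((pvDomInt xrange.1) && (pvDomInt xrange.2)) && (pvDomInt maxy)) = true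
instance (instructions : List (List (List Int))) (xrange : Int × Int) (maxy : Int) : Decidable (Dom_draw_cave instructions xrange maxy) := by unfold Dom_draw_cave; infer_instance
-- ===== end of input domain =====

-- B classifies every grid cell directly with a per-cell interval test over the segments (one
-- nested comprehension, no grid mutation and no materialized ranges), instead of A's
-- allocate-dots-then-write-targeted-cells loop (objective: alternative); proved equal on
-- Pre_draw_cave (segments lying inside the grid window).

-- ===== PORT A =====
-- helper for the statement  cave[i][j] = "#"  (pySetD/pyGetD are the total forms; exact under
-- Pre_draw_cave, which keeps every index in Python's accepted wrap range)
def pvWriteRow (cave : List (List String)) (i j : Int) : List (List String) :=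
  PySem.List.pySetD cave i (PySem.List.pySetD (PySem.List.pyGetD cave i []) j "#")

-- the body of A's `for line in instructions` loop (reads line[0][0] … via the total pyGetD;
-- exact under Pre_draw_cave, which demands the two points are present)
def pvStepA (minx : Int) (cave : List (List String)) (line : List (List Int)) : List (List String) :=
  let fx := PySem.List.pyGetD (PySem.List.pyGetD line 0 []) 0 0
  let fy := PySem.List.pyGetD (PySem.List.pyGetD line 0 []) 1 0
  let sx := PySem.List.pyGetD (PySem.List.pyGetD line 1 []) 0 0
  let sy := PySem.List.pyGetD (PySem.List.pyGetD line 1 []) 1 0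
  let cave1 :=
    if fx = sx then
      let se := if fy < sy then (fy, sy) else (sy, fy)
      (PySem.List.pyRange se.1 (se.2 + 1) 1).foldl (fun cave i => pvWriteRow cave i (fx - minx)) cave
    else cave
  if fy = sy then
    let se := if fx < sx then (fx - minx, sx - minx) else (sx - minx, fx - minx)
    (PySem.List.pyRange se.1 (se.2 + 1) 1).foldl (fun cave i => pvWriteRow cave fy i) cave1
  else cave1

def draw_cave (instructions : List (List (List Int))) (xrange : Int × Int) (maxy : Int) : List (List String) :=
  let minx := xrange.1
  let cave := (PySem.List.pyRange 0 (maxy + 1) 1).map (fun _ =>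
    (PySem.List.pyRange xrange.1 (xrange.2 + 1) 1).map (fun _ => "."))
  instructions.foldl (pvStepA minx) cave

-- ===== PORT B =====
-- B-side helpers: the four coordinates a line carries (line[0][0] etc.; under Pre_draw_cave the
-- indices are present, so getD is exact)
def pvFx (line : List (List Int)) : Int := (line.getD 0 []).getD 0 0
def pvFy (line : List (List Int)) : Int := (line.getD 0 []).getD 1 0
def pvSx (line : List (List Int)) : Int := (line.getD 1 []).getD 0 0
def pvSy (line : List (List Int)) : Int := (line.getD 1 []).getD 1 0

-- B's `rock(x, y)`: does any segment cover the absolute cell (x, y)?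
def pvRockAt (instructions : List (List (List Int))) (x y : Int) : Bool :=
  instructions.any (fun line =>
    (pvFx line == pvSx line && x == pvFx line
      && decide (min (pvFy line) (pvSy line) ≤ y) && decide (y ≤ max (pvFy line) (pvSy line)))
    || (pvFy line == pvSy line && y == pvFy line
      && decide (min (pvFx line) (pvSx line) ≤ x) && decide (x ≤ max (pvFx line) (pvSx line))))

def draw_cave_alt (instructions : List (List (List Int))) (xrange : Int × Int) (maxy : Int) : List (List String) :=
  let minx := xrange.1
  (PySem.List.pyRange 0 (maxy + 1) 1).map (fun row =>
    (PySem.List.pyRange 0 (xrange.2 - xrange.1 + 1) 1).map (fun col =>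
      if pvRockAt instructions (col + minx) row then "#" else "."))

-- ===== PRECONDITION & SPEC =====
-- Pre_ excludes segments whose cells do not all lie inside the grid window (x in
-- [xrange[0], xrange[1]], y in [0, maxy]) and lines with fewer than two points of two
-- coordinates: outside the window A raises IndexError, or, for small negative coordinates,
-- writes through Python's negative-index wraparound onto the opposite edge of the grid,
-- which B does not reproduce.
def Pre_draw_cave (instructions : List (List (List Int))) (xrange : Int × Int) (maxy : Int) : Prop :=
  ∀ line ∈ instructions,
    2 ≤ line.length ∧ 2 ≤ (line.getD 0 []).length ∧ 2 ≤ (line.getD 1 []).length ∧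
    (pvFx line = pvSx line →
      0 ≤ min (pvFy line) (pvSy line) ∧ max (pvFy line) (pvSy line) ≤ maxy ∧
      xrange.1 ≤ pvFx line ∧ pvFx line ≤ xrange.2) ∧
    (pvFy line = pvSy line →
      0 ≤ pvFy line ∧ pvFy line ≤ maxy ∧
      xrange.1 ≤ min (pvFx line) (pvSx line) ∧ max (pvFx line) (pvSx line) ≤ xrange.2)
instance (instructions : List (List (List Int))) (xrange : Int × Int) (maxy : Int) : Decidable (Pre_draw_cave instructions xrange maxy) := by unfold Pre_draw_cave; infer_instance

def pvWitness_draw_cave : List (List (List Int)) × (Int × Int) × Int := ([[[0, 0], [0, 1]]], (0, 1), 1)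

def Spec_draw_cave (instructions : List (List (List Int))) (xrange : Int × Int) (maxy : Int) (out : List (List String)) : Prop := out = draw_cave_alt instructions xrange maxy
instance (instructions : List (List (List Int))) (xrange : Int × Int) (maxy : Int) (out : List (List String)) : Decidable (Spec_draw_cave instructions xrange maxy out) := by unfold Spec_draw_cave; infer_instance

-- ===== CLAIM =====
def Claim_equal_draw_cave : Prop := ∀ (instructions : List (List (List Int))) (xrange : Int × Int) (maxy : Int), Dom_draw_cave instructions xrange maxy → Pre_draw_cave instructions xrange maxy → Spec_draw_cave instructions xrange maxy (draw_cave instructions xrange maxy)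

-- ===== LEMMAS AND PROOFS =====

-- a cell of the grid and the grid's shape
def pvCell (g : List (List String)) (r c : Nat) : String := (g.getD r []).getD c ""
def pvShape (g : List (List String)) (R W : Nat) : Prop := g.length = R ∧ ∀ row ∈ g, row.length = W

-- (a, b) is an absolute coordinate covered by the segment `line` (abbrev so `if` finds decidability)
abbrev pvCovers (line : List (List Int)) (a b : Int) : Prop :=
  (pvFx line = pvSx line ∧ a = pvFx line ∧ min (pvFy line) (pvSy line) ≤ b ∧ b ≤ max (pvFy line) (pvSy line)) ∨
  (pvFy line = pvSy line ∧ b = pvFy line ∧ min (pvFx line) (pvSx line) ≤ a ∧ a ≤ max (pvFx line) (pvSx line))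

-- a segment all of whose writes land inside the grid proper
def pvGood (x0 x1 maxy : Int) (line : List (List Int)) : Prop :=
  (pvFx line = pvSx line →
    0 ≤ min (pvFy line) (pvSy line) ∧ max (pvFy line) (pvSy line) ≤ maxy ∧
    x0 ≤ pvFx line ∧ pvFx line ≤ x1) ∧
  (pvFy line = pvSy line →
    0 ≤ pvFy line ∧ pvFy line ≤ maxy ∧
    x0 ≤ min (pvFx line) (pvSx line) ∧ max (pvFx line) (pvSx line) ≤ x1)

lemma pv_getD_set {α : Type} (l : List α) (n : Nat) (v : α) (r : Nat) (d : α) :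
    (l.set n v).getD r d = if r = n ∧ n < l.length then v else l.getD r d := by
  simp only [List.getD_eq_getElem?_getD, List.getElem?_set]
  split_ifs with h1 h2 h3 h2 <;> simp_all

lemma pv_write (g : List (List String)) (i j : Int) {R W : Nat} (hg : pvShape g R W)
    (hi0 : 0 ≤ i) (hiR : i < (R : Int)) (hj0 : 0 ≤ j) (hjW : j < (W : Int)) :
    pvShape (pvWriteRow g i j) R W ∧
    ∀ r c : Nat, pvCell (pvWriteRow g i j) r c =
      if (r : Int) = i ∧ (c : Int) = j then "#" else pvCell g r c := by
  obtain ⟨hlen, hrows⟩ := hg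
  have hiN : i.toNat < g.length := by omega
  have hrow : g.getD i.toNat [] = g[i.toNat] := List.getD_eq_getElem g [] hiN
  have hrowW : (g[i.toNat]).length = W := hrows _ (List.getElem_mem hiN)
  have hjN : j.toNat < W := by omega
  unfold pvWriteRow
  rw [PySem.List.pySetD_of_nonneg _ _ hi0, PySem.List.pyGetD_of_nonneg _ _ hi0,
    PySem.List.pySetD_of_nonneg _ _ hj0]
  constructor
  · refine ⟨by simp [hlen], ?_⟩
    intro row hrw
    rcases List.mem_or_eq_of_mem_set hrw with h | h
    · exact hrows _ h
    · subst h; rw [List.length_set, hrow, hrowW]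
  · intro r c
    unfold pvCell
    rw [pv_getD_set]
    by_cases hri : r = i.toNat
    · subst hri
      rw [if_pos ⟨rfl, hiN⟩, hrow, pv_getD_set, hrowW]
      by_cases hcj : c = j.toNat
      · subst hcj
        rw [if_pos ⟨rfl, hjN⟩, if_pos (by constructor <;> omega)]
      · rw [if_neg (by omega), if_neg (by omega)]
    · rw [if_neg (by omega), if_neg (by omega)]

lemma pv_vloop (j : Int) {R W : Nat} (hj0 : 0 ≤ j) (hjW : j < (W : Int)) (ys : List Int) :
    ∀ g, pvShape g R W → (∀ y ∈ ys, 0 ≤ y ∧ y < (R : Int)) →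
    pvShape (ys.foldl (fun cave i => pvWriteRow cave i j) g) R W ∧
    ∀ r c : Nat, pvCell (ys.foldl (fun cave i => pvWriteRow cave i j) g) r c =
      if (r : Int) ∈ ys ∧ (c : Int) = j then "#" else pvCell g r c := by
  induction ys with
  | nil => intro g hg _; exact ⟨hg, by simp⟩
  | cons y ys ih =>
    intro g hg hys
    obtain ⟨hy0, hyR⟩ := hys y List.mem_cons_self
    obtain ⟨hw1, hw2⟩ := pv_write g y j hg hy0 hyR hj0 hjW
    obtain ⟨hs, hcell⟩ := ih (pvWriteRow g y j) hw1 (fun z hz => hys z (List.mem_cons_of_mem _ hz))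
    refine ⟨hs, ?_⟩
    intro r c
    rw [List.foldl_cons] at *
    rw [hcell, hw2]
    by_cases hc : (c : Int) = j <;> by_cases hm : (r : Int) ∈ ys <;>
      by_cases hry : (r : Int) = y <;> simp [List.mem_cons, hc, hm, hry]

lemma pv_hloop (i : Int) {R W : Nat} (hi0 : 0 ≤ i) (hiR : i < (R : Int)) (ys : List Int) :
    ∀ g, pvShape g R W → (∀ y ∈ ys, 0 ≤ y ∧ y < (W : Int)) →
    pvShape (ys.foldl (fun cave k => pvWriteRow cave i k) g) R W ∧
    ∀ r c : Nat, pvCell (ys.foldl (fun cave k => pvWriteRow cave i k) g) r c =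
      if (r : Int) = i ∧ (c : Int) ∈ ys then "#" else pvCell g r c := by
  induction ys with
  | nil => intro g hg _; exact ⟨hg, by simp⟩
  | cons y ys ih =>
    intro g hg hys
    obtain ⟨hy0, hyW⟩ := hys y List.mem_cons_self
    obtain ⟨hw1, hw2⟩ := pv_write g i y hg hi0 hiR hy0 hyW
    obtain ⟨hs, hcell⟩ := ih (pvWriteRow g i y) hw1 (fun z hz => hys z (List.mem_cons_of_mem _ hz))
    refine ⟨hs, ?_⟩
    intro r c
    rw [List.foldl_cons] at *
    rw [hcell, hw2]
    by_cases hc : (r : Int) = i <;> by_cases hm : (c : Int) ∈ ys <;>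
      by_cases hry : (c : Int) = y <;> simp [List.mem_cons, hc, hm, hry]

lemma pv_pair (a b : Int) : (if a < b then (a, b) else (b, a)) = (min a b, max a b) := by
  split_ifs with h <;> simp [min_def, max_def] <;> omega

lemma pv_pair_sub (a b k : Int) :
    (if a < b then (a - k, b - k) else (b - k, a - k)) = (min a b - k, max a b - k) := by
  split_ifs with h <;> simp [min_def, max_def] <;> omega

lemma pv_efx (line : List (List Int)) : PySem.List.pyGetD (PySem.List.pyGetD line 0 []) 0 0 = pvFx line := by
  simp [PySem.List.pyGetD_ofNat', pvFx]
lemma pv_efy (line : List (List Int)) : PySem.List.pyGetD (PySem.List.pyGetD line 0 []) 1 0 = pvFy line := by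
  simp [PySem.List.pyGetD_ofNat', pvFy]
lemma pv_esx (line : List (List Int)) : PySem.List.pyGetD (PySem.List.pyGetD line 1 []) 0 0 = pvSx line := by
  simp [PySem.List.pyGetD_ofNat', pvSx]
lemma pv_esy (line : List (List Int)) : PySem.List.pyGetD (PySem.List.pyGetD line 1 []) 1 0 = pvSy line := by
  simp [PySem.List.pyGetD_ofNat', pvSy]

lemma pv_lineA (x0 x1 maxy : Int) (line : List (List Int)) (hl : pvGood x0 x1 maxy line)
    {R W : Nat} (hR : (R : Int) = max (maxy + 1) 0) (hW : (W : Int) = max (x1 + 1 - x0) 0)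
    (g : List (List String)) (hg : pvShape g R W) :
    pvShape (pvStepA x0 g line) R W ∧
    ∀ r c : Nat, r < R → c < W →
      pvCell (pvStepA x0 g line) r c =
        if pvCovers line (x0 + c) r then "#" else pvCell g r c := by
  obtain ⟨hv, hh⟩ := hl
  simp only [pvStepA, pv_efx, pv_efy, pv_esx, pv_esy, pv_pair, pv_pair_sub]
  by_cases hfx : pvFx line = pvSx line <;> by_cases hfy : pvFy line = pvSy line
  · -- both vertical and horizontal
    rw [if_pos hfx, if_pos hfy]
    obtain ⟨hmy0, hmy1, hx0, hx1⟩ := hv hfx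
    obtain ⟨hfy0, hfy1, hnx0, hnx1⟩ := hh hfy
    obtain ⟨hs1, hc1⟩ := pv_vloop (pvFx line - x0) (R := R) (W := W) (by omega) (by omega)
      (PySem.List.pyRange (min (pvFy line) (pvSy line)) (max (pvFy line) (pvSy line) + 1) 1) g hg
      (by intro y hy; rw [PySem.List.mem_pyRange_one] at hy; omega)
    obtain ⟨hs2, hc2⟩ := pv_hloop (pvFy line) (R := R) (W := W) (by omega) (by omega)
      (PySem.List.pyRange (min (pvFx line) (pvSx line) - x0) (max (pvFx line) (pvSx line) - x0 + 1) 1)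
      _ hs1
      (by intro y hy; rw [PySem.List.mem_pyRange_one] at hy; omega)
    refine ⟨hs2, ?_⟩
    intro r c hr hc
    rw [hc2, hc1]
    simp only [pvCovers, PySem.List.mem_pyRange_one]
    split_ifs <;> first | rfl | omega
  · -- vertical only
    rw [if_pos hfx, if_neg hfy]
    obtain ⟨hmy0, hmy1, hx0, hx1⟩ := hv hfx
    obtain ⟨hs1, hc1⟩ := pv_vloop (pvFx line - x0) (R := R) (W := W) (by omega) (by omega)
      (PySem.List.pyRange (min (pvFy line) (pvSy line)) (max (pvFy line) (pvSy line) + 1) 1) g hg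
      (by intro y hy; rw [PySem.List.mem_pyRange_one] at hy; omega)
    refine ⟨hs1, ?_⟩
    intro r c hr hc
    rw [hc1]
    simp only [pvCovers, PySem.List.mem_pyRange_one]
    split_ifs <;> first | rfl | omega
  · -- horizontal only
    rw [if_neg hfx, if_pos hfy]
    obtain ⟨hfy0, hfy1, hnx0, hnx1⟩ := hh hfy
    obtain ⟨hs2, hc2⟩ := pv_hloop (pvFy line) (R := R) (W := W) (by omega) (by omega)
      (PySem.List.pyRange (min (pvFx line) (pvSx line) - x0) (max (pvFx line) (pvSx line) - x0 + 1) 1)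
      g hg
      (by intro y hy; rw [PySem.List.mem_pyRange_one] at hy; omega)
    refine ⟨hs2, ?_⟩
    intro r c hr hc
    rw [hc2]
    simp only [pvCovers, PySem.List.mem_pyRange_one]
    split_ifs <;> first | rfl | omega
  · -- neither
    rw [if_neg hfx, if_neg hfy]
    refine ⟨hg, ?_⟩
    intro r c hr hc
    simp only [pvCovers]
    rw [if_neg (by tauto)]

lemma pv_foldA (x0 x1 maxy : Int) {R W : Nat} (hR : (R : Int) = max (maxy + 1) 0)
    (hW : (W : Int) = max (x1 + 1 - x0) 0) (lines : List (List (List Int))) :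
    ∀ g, (∀ l ∈ lines, pvGood x0 x1 maxy l) → pvShape g R W →
    pvShape (lines.foldl (pvStepA x0) g) R W ∧
    ∀ r c : Nat, r < R → c < W →
      pvCell (lines.foldl (pvStepA x0) g) r c =
        if ∃ l ∈ lines, pvCovers l (x0 + c) r then "#" else pvCell g r c := by
  induction lines with
  | nil => intro g _ hg; exact ⟨hg, by simp⟩
  | cons l ls ih =>
    intro g hls hg
    obtain ⟨hs1, hc1⟩ := pv_lineA x0 x1 maxy l (hls l List.mem_cons_self) hR hW g hg
    obtain ⟨hs2, hc2⟩ := ih (pvStepA x0 g l) (fun z hz => hls z (List.mem_cons_of_mem _ hz)) hs1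
    refine ⟨hs2, ?_⟩
    intro r c hr hc
    rw [List.foldl_cons, hc2 r c hr hc, hc1 r c hr hc]
    by_cases h1 : ∃ x ∈ ls, pvCovers x (x0 + c) r <;> by_cases h2 : pvCovers l (x0 + c) r <;>
      simp [h1, h2]

-- B's per-cell test is exactly "some segment covers the cell"
lemma pv_rockAt (ins : List (List (List Int))) (x y : Int) :
    pvRockAt ins x y = true ↔ ∃ l ∈ ins, pvCovers l x y := by
  unfold pvRockAt
  rw [List.any_eq_true]
  constructor
  · rintro ⟨l, hl, h⟩
    refine ⟨l, hl, ?_⟩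
    simp only [Bool.or_eq_true, Bool.and_eq_true, beq_iff_eq, decide_eq_true_eq] at h
    unfold pvCovers
    tauto
  · rintro ⟨l, hl, h⟩
    refine ⟨l, hl, ?_⟩
    simp only [Bool.or_eq_true, Bool.and_eq_true, beq_iff_eq, decide_eq_true_eq]
    unfold pvCovers at h
    tauto

lemma pv_main (ins : List (List (List Int))) (x0 x1 maxy : Int)
    (hgood : ∀ l ∈ ins, pvGood x0 x1 maxy l) :
    draw_cave ins (x0, x1) maxy = draw_cave_alt ins (x0, x1) maxy := by
  simp only [draw_cave, draw_cave_alt]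
  set R : Nat := (maxy + 1).toNat with hRdef
  set W : Nat := (x1 + 1 - x0).toNat with hWdef
  have hR : ((R : Nat) : Int) = max (maxy + 1) 0 := Int.toNat_eq_max _
  have hW : ((W : Nat) : Int) = max (x1 + 1 - x0) 0 := Int.toNat_eq_max _
  have hg0 : (PySem.List.pyRange 0 (maxy + 1) 1).map (fun _ =>
      (PySem.List.pyRange x0 (x1 + 1) 1).map (fun _ => ".")) =
      List.replicate R (List.replicate W ".") := by
    simp [List.map_const', PySem.List.length_pyRange_one, hRdef, hWdef]
  rw [hg0]
  have hshape0 : pvShape (List.replicate R (List.replicate W ".")) R W := by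
    constructor
    · simp
    · intro row hrow
      rw [List.eq_of_mem_replicate hrow]
      simp
  have hcell0 : ∀ r c : Nat, r < R → c < W →
      pvCell (List.replicate R (List.replicate W ".")) r c = "." := by
    intro r c hr hc
    unfold pvCell
    rw [List.getD_eq_getElem _ _
      (show r < (List.replicate R (List.replicate W ".")).length by simpa using hr)]
    rw [List.getElem_replicate]
    rw [List.getD_eq_getElem _ _
      (show c < (List.replicate W ("." : String)).length by simpa using hc)]
    rw [List.getElem_replicate]
  obtain ⟨hsA, hcA⟩ := pv_foldA x0 x1 maxy hR hW ins _ hgood hshape0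
  apply List.ext_getElem
  · rw [hsA.1]
    simp only [List.length_map, PySem.List.length_pyRange_one]
    omega
  · intro r h1 h2
    have hrR : r < R := by rw [← hsA.1]; exact h1
    apply List.ext_getElem
    · rw [hsA.2 _ (List.getElem_mem h1)]
      simp only [List.getElem_map, List.length_map, PySem.List.length_pyRange_one]
      omega
    · intro c hc1 hc2
      have hcW : c < W := by rw [← hsA.2 _ (List.getElem_mem h1)]; exact hc1
      have hcell := hcA r c hrR hcW
      rw [hcell0 r c hrR hcW] at hcell
      unfold pvCell at hcell
      rw [List.getD_eq_getElem _ _ h1] at hcell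
      rw [List.getD_eq_getElem _ _ hc1] at hcell
      rw [hcell]
      simp only [List.getElem_map, PySem.List.getElem_pyRange_one]
      have hmem : pvRockAt ins (0 + (c : Int) + x0) (0 + (r : Int)) = true ↔
          ∃ l ∈ ins, pvCovers l (x0 + c) r := by
        rw [pv_rockAt]
        have e1 : (0 : Int) + (c : Int) + x0 = x0 + c := by ring
        have e2 : (0 : Int) + (r : Int) = (r : Int) := by ring
        rw [e1, e2]
      by_cases hE : ∃ l ∈ ins, pvCovers l (x0 + c) r
      · rw [if_pos hE, if_pos (hmem.mpr hE)]
      · rw [if_neg hE, if_neg (fun h => hE (hmem.mp h))]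

-- ===== VERDICT =====
theorem draw_cave_spec : Claim_equal_draw_cave := by
  intro ins xr maxy _ hpre
  obtain ⟨x0, x1⟩ := xr
  have hgood : ∀ l ∈ ins, pvGood x0 x1 maxy l := by
    intro l hl
    obtain ⟨_, _, _, hv, hh⟩ := hpre l hl
    exact ⟨hv, hh⟩
  exact pv_main ins x0 x1 maxy hgood
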